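-- pv_equiv track=rewrite | github.com/d6vid/python-semantic-analyzer | src/general_helpers.py | add_whitespace_between_specific_chars
-- ===== SOURCE A (Python) =====
-- def add_whitespace_between_specific_chars(input_string, chars_to_add_whitespace):
--     result = ''
--     for char in input_string:
--         if char in chars_to_add_whitespace:
--             result += f' {char} '
--         else:
--             result += char
--     return result
-- ===== SOURCE B (Python) =====
-- def add_whitespace_between_specific_chars(input_string, chars_to_add_whitespace):
--     specials = set(chars_to_add_whitespace)
--     cuts = [(i, ch) for i, ch in enumerate(input_string) if ch in specials]
--     parts = []
--     prev = 0
--     for i, ch in cuts: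
--         parts.append(input_string[prev:i])
--         parts.append(f' {ch} ')
--         prev = i + 1
--     parts.append(input_string[prev:])
--     return ''.join(parts)
-- ===== Notes on version B (the rewrite author's own statement) =====
-- stated objective: alternative
-- what changed: Instead of A's char-by-char accumulation loop, B first collects the positions of the special characters and then assembles the output by joining the untouched slices between them with the padded characters.
import Mathlib
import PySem

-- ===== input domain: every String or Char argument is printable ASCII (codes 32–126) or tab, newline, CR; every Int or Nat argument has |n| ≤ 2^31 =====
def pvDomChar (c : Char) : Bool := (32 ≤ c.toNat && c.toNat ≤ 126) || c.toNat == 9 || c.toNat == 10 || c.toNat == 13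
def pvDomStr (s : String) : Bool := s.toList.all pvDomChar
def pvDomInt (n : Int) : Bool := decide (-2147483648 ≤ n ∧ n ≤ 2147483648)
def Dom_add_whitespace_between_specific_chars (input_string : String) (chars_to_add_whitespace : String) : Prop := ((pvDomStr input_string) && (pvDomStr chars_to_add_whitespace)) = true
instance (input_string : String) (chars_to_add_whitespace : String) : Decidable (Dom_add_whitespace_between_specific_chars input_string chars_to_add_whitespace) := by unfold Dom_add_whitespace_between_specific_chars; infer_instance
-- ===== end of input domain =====

-- B replaces A's char-by-char accumulation loop with a staged slice-assembly algorithm: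
-- first collect the positions of the special characters, then join the untouched
-- segments between them with the padded characters (alternative decomposition).

-- ===== PORT A =====
def add_whitespace_between_specific_chars (input_string : String) (chars_to_add_whitespace : String) : String :=
  String.ofList (input_string.toList.foldl
    (fun result char =>
      if chars_to_add_whitespace.toList.contains char then result ++ [' ', char, ' ']
      else result ++ [char]) [])

-- ===== PORT B =====
-- specials = set(chars); cuts = [(i, ch) for i, ch in enumerate(s) if ch in specials];
-- then assemble the slices between the cuts and join.
def add_whitespace_between_specific_chars_alt (input_string : String) (chars_to_add_whitespace : String) : String :=
  let s := input_string.toList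
  let specials : PySem.Set Char := PySem.Set.ofList chars_to_add_whitespace.toList
  let cuts := (PySem.List.enumerate s 0).filter (fun p => specials.contains p.2)
  let st := cuts.foldl
    (fun (st : List (List Char) × Int) p =>
      (st.1 ++ [PySem.List.slice s (some st.2) (some p.1), [' ', p.2, ' ']], p.1 + 1))
    ([], 0)
  String.ofList ((st.1 ++ [PySem.List.slice s (some st.2) none]).flatten)

-- ===== PRECONDITION & SPEC =====
def Spec_add_whitespace_between_specific_chars (input_string : String) (chars_to_add_whitespace : String) (out : String) : Prop := out = add_whitespace_between_specific_chars_alt input_string chars_to_add_whitespace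
instance (input_string : String) (chars_to_add_whitespace : String) (out : String) : Decidable (Spec_add_whitespace_between_specific_chars input_string chars_to_add_whitespace out) := by unfold Spec_add_whitespace_between_specific_chars; infer_instance

-- ===== CLAIM (what is proved, stated in full; the proofs are below) =====
def Claim_equal_add_whitespace_between_specific_chars : Prop := ∀ (input_string : String) (chars_to_add_whitespace : String), Dom_add_whitespace_between_specific_chars input_string chars_to_add_whitespace → Spec_add_whitespace_between_specific_chars input_string chars_to_add_whitespace (add_whitespace_between_specific_chars input_string chars_to_add_whitespace)

-- ===== LEMMAS AND PROOFS =====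

-- the loop invariant of B's assembly stage: folding over the cuts of the suffix t = s.drop k,
-- starting with pending slice start p ≤ k, produces acc, the pending slice, and the padded suffix
lemma assemble_invariant (s : List Char) (spec : Char → Bool) :
    ∀ (t : List Char) (k p : Nat) (acc : List (List Char)),
      t = s.drop k → p ≤ k →
      (let st := ((PySem.List.enumerate t (k : Int)).filter (fun q => spec q.2)).foldl
          (fun (st : List (List Char) × Int) q =>
            (st.1 ++ [PySem.List.slice s (some st.2) (some q.1), [' ', q.2, ' ']], q.1 + 1))
          (acc, (p : Int));
        (st.1 ++ [PySem.List.slice s (some st.2) none]).flatten)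
      = acc.flatten ++ (s.drop p).take (k - p)
          ++ t.flatMap (fun c => if spec c then [' ', c, ' '] else [c]) := by
  intro t
  induction t with
  | nil =>
    intro k p acc ht hp
    have hk : s.length ≤ k := by
      have := congrArg List.length ht
      simp at this; omega
    simp [PySem.List.enumerate, PySem.List.slice_from]
    omega
  | cons c t' ih =>
    intro k p acc ht hp
    have hk : k < s.length := by
      have := congrArg List.length ht
      simp at this; omega
    have ht' : t' = s.drop (k + 1) := by
      have := congrArg List.tail ht
      simpa [List.tail_drop] using this
    have hc : s[k]? = some c := by
      have : (s.drop k)[0]? = some c := by rw [← ht]; simp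
      simpa using this
    rw [PySem.List.enumerate_cons]
    by_cases hs : spec c
    · simp only [List.filter_cons, hs, if_pos, List.foldl_cons]
      have hcast : ((k : Int) + 1) = ((k + 1 : Nat) : Int) := by push_cast; ring
      rw [hcast, ih (k + 1) (k + 1) _ ht' le_rfl]
      simp [PySem.List.slice_natCast, hs]
    · have hf : spec ((k : Int), c).2 = false := by simp [hs]
      simp only [List.filter_cons, hf, Bool.false_eq_true, if_false]
      have hcast : ((k : Int) + 1) = ((k + 1 : Nat) : Int) := by push_cast; ring
      rw [hcast, ih (k + 1) p acc ht' (by omega)]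
      have hstep : (s.drop p).take (k + 1 - p) = (s.drop p).take (k - p) ++ [c] := by
        have hkp : k + 1 - p = (k - p) + 1 := by omega
        rw [hkp, List.take_add_one]
        have : (s.drop p)[k - p]? = some c := by
          rw [List.getElem?_drop]
          have : p + (k - p) = k := by omega
          rw [this, hc]
        simp [this]
      simp [ht', hstep, hs]

-- ===== VERDICT (by name: the statement is the Claim_ definition above) =====
theorem add_whitespace_between_specific_chars_spec : Claim_equal_add_whitespace_between_specific_chars := by
  intro s chars _
  show _ = _
  unfold add_whitespace_between_specific_chars add_whitespace_between_specific_chars_alt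
  simp only []
  congr 1
  -- A's loop is the flatMap of the per-char choice
  have hbody : (fun (result : List Char) char =>
      if chars.toList.contains char then result ++ [' ', char, ' '] else result ++ [char])
      = fun result char => result ++
          (if chars.toList.contains char then [' ', char, ' '] else [char]) := by
    funext a c; split <;> rfl
  rw [hbody, PySem.List.foldl_append_eq_flatMap]
  -- B's staged assembly produces the same flatMap
  have := assemble_invariant s.toList
      (fun c => PySem.Set.contains (PySem.Set.ofList chars.toList) c)
      s.toList 0 0 [] (by simp) le_rfl
  simp only [Nat.cast_zero] at this
  rw [this]
  simp
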